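-- pv_equiv track=rewrite | github.com/krispeterson/repath-model | scripts/evaluation/dedupe_benchmark_manifest.py | count_summary
-- ===== SOURCE A (Python) =====
-- def count_summary(images: list[dict]) -> dict:
--     return {
--         "total": len(images),
--         "ready": sum(1 for entry in images if str((entry or {}).get("status") or "").lower() == "ready"),
--         "todo": sum(1 for entry in images if str((entry or {}).get("status") or "").lower() == "todo"),
--         "with_url": sum(1 for entry in images if str((entry or {}).get("url") or "").strip()),
--         "missing_url": sum(1 for entry in images if not str((entry or {}).get("url") or "").strip()),
--     }
-- ===== SOURCE B (Python) =====
-- def count_summary(images: list[dict]) -> dict: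
--     ready = todo = with_url = missing_url = 0
--     for entry in images:
--         status = str((entry or {}).get("status") or "").lower()
--         url_ok = bool(str((entry or {}).get("url") or "").strip())
--         if status == "ready":
--             ready += 1
--         elif status == "todo":
--             todo += 1
--         if url_ok:
--             with_url += 1
--         else:
--             missing_url += 1
--     return {
--         "total": len(images),
--         "ready": ready,
--         "todo": todo,
--         "with_url": with_url,
--         "missing_url": missing_url,
--     }
-- ===== Notes on version B (the rewrite author's own statement) =====
-- stated objective: alternative
-- what changed: Replaces A's four separate generator-expression passes over the list with a single loop maintaining four counters (todo via elif, missing_url as the else of the url test).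
import Mathlib
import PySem

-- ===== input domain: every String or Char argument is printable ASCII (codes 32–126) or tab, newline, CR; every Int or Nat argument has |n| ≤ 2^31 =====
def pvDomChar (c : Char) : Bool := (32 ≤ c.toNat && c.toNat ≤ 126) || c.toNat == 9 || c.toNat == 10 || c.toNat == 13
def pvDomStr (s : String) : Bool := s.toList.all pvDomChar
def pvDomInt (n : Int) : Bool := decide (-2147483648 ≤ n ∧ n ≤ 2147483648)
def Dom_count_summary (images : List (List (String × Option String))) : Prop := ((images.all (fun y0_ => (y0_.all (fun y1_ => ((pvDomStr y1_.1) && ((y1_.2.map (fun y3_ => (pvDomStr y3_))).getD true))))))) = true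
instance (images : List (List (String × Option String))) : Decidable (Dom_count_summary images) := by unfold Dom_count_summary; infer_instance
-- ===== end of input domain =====

-- B replaces A's four separate counting passes over the list with a single fold maintaining four counters (alternative decomposition, same cost).


-- ===== PORT A =====
-- str((entry or {}).get(k) or ""): first-match dict lookup; None / missing / "" all give ""
def pvGet (entry : List (String × Option String)) (k : String) : String :=
  match entry.find? (fun p => p.1 == k) with
  | some (_, some v) => v
  | _ => ""

def count_summary (images : List (List (String × Option String))) : List (String × Int) :=
  [("total", (images.length : Int)),
   ("ready", images.foldl (fun acc e => if PySem.Str.lower (pvGet e "status") == "ready" then acc + 1 else acc) 0),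
   ("todo", images.foldl (fun acc e => if PySem.Str.lower (pvGet e "status") == "todo" then acc + 1 else acc) 0),
   ("with_url", images.foldl (fun acc e => if !(PySem.Str.strip (pvGet e "url") == "") then acc + 1 else acc) 0),
   ("missing_url", images.foldl (fun acc e => if PySem.Str.strip (pvGet e "url") == "" then acc + 1 else acc) 0)]

-- ===== PORT B =====
structure BCounts where
  ready : Int
  todo : Int
  withUrl : Int
  missingUrl : Int
deriving Repr, DecidableEq

def bField (entry : List (String × Option String)) (k : String) : String :=
  match entry.lookup k with
  | some (some v) => v
  | _ => ""

def bStep (c : BCounts) (e : List (String × Option String)) : BCounts :=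
  let status := PySem.Str.lower (bField e "status")
  let urlOk := !(PySem.Str.strip (bField e "url") == "")
  let c := if status == "ready" then { c with ready := c.ready + 1 }
           else if status == "todo" then { c with todo := c.todo + 1 }
           else c
  if urlOk then { c with withUrl := c.withUrl + 1 }
  else { c with missingUrl := c.missingUrl + 1 }

def count_summary_alt (images : List (List (String × Option String))) : List (String × Int) :=
  let c := images.foldl bStep ⟨0, 0, 0, 0⟩
  [("total", (images.length : Int)),
   ("ready", c.ready),
   ("todo", c.todo),
   ("with_url", c.withUrl),
   ("missing_url", c.missingUrl)]

-- ===== PRECONDITION & SPEC =====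
def Spec_count_summary (images : List (List (String × Option String))) (out : List (String × Int)) : Prop := out = count_summary_alt images
instance (images : List (List (String × Option String))) (out : List (String × Int)) : Decidable (Spec_count_summary images out) := by unfold Spec_count_summary; infer_instance

-- ===== CLAIM (what is proved, stated in full; the proofs are below) =====
def Claim_equal_count_summary : Prop := ∀ (images : List (List (String × Option String))), Dom_count_summary images → Spec_count_summary images (count_summary images)

-- ===== LEMMAS AND PROOFS =====
theorem bField_eq_pvGet (e : List (String × Option String)) (k : String) : bField e k = pvGet e k := by
  induction e with
  | nil => rfl
  | cons p rest ih =>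
    obtain ⟨pk, pv⟩ := p
    by_cases h : pk = k
    · subst h
      cases pv <;> simp [bField, pvGet, List.lookup, List.find?]
    · have h1 : (k == pk) = false := by simp [Ne.symm h]
      have h2 : (pk == k) = false := by simp [h]
      simp only [bField, pvGet, List.lookup, List.find?, h1, h2] at *
      exact ih

theorem foldl_count {α : Type} (p : α → Bool) (l : List α) (n : Int) :
    l.foldl (fun acc e => if p e then acc + 1 else acc) n = n + (l.countP p : Int) := by
  induction l generalizing n with
  | nil => simp
  | cons x xs ih =>
    simp only [List.foldl_cons, List.countP_cons, ih]
    by_cases h : p x <;> simp [h] <;> omega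


theorem bfold_eq (l : List (List (String × Option String))) (c : BCounts) :
    l.foldl bStep c =
      ⟨c.ready + (l.countP (fun e => PySem.Str.lower (pvGet e "status") == "ready") : Int),
       c.todo + (l.countP (fun e => PySem.Str.lower (pvGet e "status") == "todo") : Int),
       c.withUrl + (l.countP (fun e => !(PySem.Str.strip (pvGet e "url") == "")) : Int),
       c.missingUrl + (l.countP (fun e => PySem.Str.strip (pvGet e "url") == "") : Int)⟩ := by
  induction l generalizing c with
  | nil => simp
  | cons e rest ih =>
    simp only [List.foldl_cons, List.countP_cons, ih]
    simp only [bStep, bField_eq_pvGet]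
    by_cases h1 : PySem.Str.lower (pvGet e "status") == "ready"
    · have h2 : (PySem.Str.lower (pvGet e "status") == "todo") = false := by
        rw [beq_iff_eq] at h1
        rw [h1]; decide
      by_cases h3 : PySem.Str.strip (pvGet e "url") == "" <;>
        simp [h1, h2, h3, BCounts.mk.injEq] <;> omega
    · by_cases h2 : PySem.Str.lower (pvGet e "status") == "todo" <;>
        by_cases h3 : PySem.Str.strip (pvGet e "url") == "" <;>
          simp [h1, h2, h3, BCounts.mk.injEq] <;> omega

-- ===== VERDICT (by name: the statement is the Claim_ definition above) =====
theorem count_summary_spec : Claim_equal_count_summary := by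
  intro images _
  show count_summary images = count_summary_alt images
  simp only [count_summary, count_summary_alt, bfold_eq, foldl_count]
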